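-- pv_equiv track=rewrite | github.com/fahamnaz/dabang_coders | ml_models/data/feature_engineering.py | _consecutive_errors_now
-- ===== SOURCE A (Python) =====
-- def _consecutive_errors_now(events: list[dict]) -> int:
--     """Number of consecutive errors at the very tail of events."""
--     count = 0
--     for e in reversed(events):
--         if not e.get("correct", True):
--             count += 1
--         else:
--             break
--     return count
-- ===== SOURCE B (Python) =====
-- def _consecutive_errors_now(events: list[dict]) -> int:
--     """Number of consecutive errors at the very tail of events."""
--     run = 0
--     for e in events:
--         if not e.get("correct", True):
--             run += 1
--         else:
--             run = 0
--     return run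
-- ===== Notes on version B (the rewrite author's own statement) =====
-- stated objective: alternative
-- what changed: Replaced the reversed scan with early break by a single forward pass keeping a reset-on-correct run counter whose final value is the trailing error run.
import Mathlib
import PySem

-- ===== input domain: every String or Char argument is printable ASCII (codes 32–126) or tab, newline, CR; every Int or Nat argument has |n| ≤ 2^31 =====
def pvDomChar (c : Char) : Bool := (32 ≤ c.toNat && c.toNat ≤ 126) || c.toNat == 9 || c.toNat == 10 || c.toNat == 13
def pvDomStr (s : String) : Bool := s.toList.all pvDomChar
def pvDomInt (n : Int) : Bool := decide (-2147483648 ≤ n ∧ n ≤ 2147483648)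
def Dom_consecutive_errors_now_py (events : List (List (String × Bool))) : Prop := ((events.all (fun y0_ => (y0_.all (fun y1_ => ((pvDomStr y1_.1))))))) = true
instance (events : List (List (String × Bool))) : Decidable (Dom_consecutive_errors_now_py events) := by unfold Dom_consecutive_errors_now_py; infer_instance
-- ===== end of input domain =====

-- B replaces A's reversed early-break scan by a forward pass with a reset-on-correct run counter; same return value, no speed claim.

-- ===== PORT A =====
-- count = 0; for e in reversed(events): if not e.get("correct", True): count += 1 else: break
def pvLoopA : List (List (String × Bool)) → Int → Int
  | [], count => count
  | e :: rest, count =>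
    if !((PySem.Dict.mk e).getD "correct" true) then pvLoopA rest (count + 1)
    else count

def consecutive_errors_now_py (events : List (List (String × Bool))) : Int :=
  pvLoopA events.reverse 0

-- ===== PORT B =====
-- run = 0; for e in events: run = run + 1 if not e.get("correct", True) else 0
def consecutive_errors_now_py_alt (events : List (List (String × Bool))) : Int :=
  events.foldl (fun run e => if !((PySem.Dict.mk e).getD "correct" true) then run + 1 else 0) 0

-- ===== PRECONDITION & SPEC =====
def Spec_consecutive_errors_now_py (events : List (List (String × Bool))) (out : Int) : Prop := out = consecutive_errors_now_py_alt events
instance (events : List (List (String × Bool))) (out : Int) : Decidable (Spec_consecutive_errors_now_py events out) := by unfold Spec_consecutive_errors_now_py; infer_instance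

-- ===== CLAIM (what is proved, stated in full; the proofs are below) =====
def Claim_equal_consecutive_errors_now_py : Prop := ∀ (events : List (List (String × Bool))), Dom_consecutive_errors_now_py events → Spec_consecutive_errors_now_py events (consecutive_errors_now_py events)

-- ===== LEMMAS AND PROOFS =====

-- ===== VERDICT (by name: the statement is the Claim_ definition above) =====
theorem pvLoopA_shift (l : List (List (String × Bool))) (c : Int) :
    pvLoopA l c = pvLoopA l 0 + c := by
  induction l generalizing c with
  | nil => simp [pvLoopA]
  | cons e rest ih =>
    simp only [pvLoopA]
    split
    · rw [ih (c + 1), ih (0 + 1)]; ring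
    · ring

theorem pvAB (l : List (List (String × Bool))) :
    l.foldl (fun run e => if !((PySem.Dict.mk e).getD "correct" true) then run + 1 else 0) 0
      = pvLoopA l.reverse 0 := by
  induction l using List.reverseRecOn with
  | nil => simp [pvLoopA]
  | append_singleton l e ih =>
    rw [List.foldl_append, List.foldl_cons, List.foldl_nil, List.reverse_append]
    simp only [List.reverse_cons, List.reverse_nil, List.nil_append, List.singleton_append,
      pvLoopA]
    split
    · rw [ih, pvLoopA_shift l.reverse (0 + 1)]; omega
    · rfl

theorem consecutive_errors_now_py_spec : Claim_equal_consecutive_errors_now_py := by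
  intro events _
  unfold Spec_consecutive_errors_now_py consecutive_errors_now_py consecutive_errors_now_py_alt
  exact (pvAB events).symm
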